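-- pv_equiv track=rewrite | github.com/nardogod/rag3det | ml/ner/patterns.py | _find_terms
-- ===== SOURCE A (Python) =====
-- from typing import Iterable, List, Tuple
--
-- EntitySpan = Tuple[int, int, str]
--
-- def _find_terms(text: str, terms: Iterable[str], label: str) -> List[EntitySpan]:
--     spans: List[EntitySpan] = []
--     for term in terms:
--         start = 0
--         while True:
--             idx = text.find(term, start)
--             if idx == -1:
--                 break
--             spans.append((idx, idx + len(term), label))
--             start = idx + len(term)
--     return spans
-- ===== SOURCE B (Python) =====
-- def _find_terms(text, terms, label):
--     # Single left-to-right pass over the text: at each position every term is tried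
--     # against its own greedy end marker; matches are collected per term and then
--     # emitted grouped in term order (A instead loops over terms, restarting
--     # text.find after each hit).
--     states = [[term, 0, []] for term in terms]  # [term, next allowed start, matches]
--     for i in range(len(text)):
--         for st in states:
--             term = st[0]
--             if i >= st[1] and text[i:i + len(term)] == term:
--                 st[1] = i + len(term)
--                 st[2].append((i, i + len(term), label))
--     out = []
--     for st in states:
--         out.extend(st[2])
--     return out
-- ===== Notes on version B (the rewrite author's own statement) =====
-- stated objective: alternative
-- what changed: B transposes the traversal: one single pass over text positions trying every term at each position against a per-term greedy end marker, collecting matches per term and emitting them grouped afterwards, instead of A's per-term while-loop of repeated text.find restarts; Pre_ excludes term lists containing the empty string, on which A's while loop never terminates (text.find('', start) keeps returning start).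
import Mathlib
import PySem

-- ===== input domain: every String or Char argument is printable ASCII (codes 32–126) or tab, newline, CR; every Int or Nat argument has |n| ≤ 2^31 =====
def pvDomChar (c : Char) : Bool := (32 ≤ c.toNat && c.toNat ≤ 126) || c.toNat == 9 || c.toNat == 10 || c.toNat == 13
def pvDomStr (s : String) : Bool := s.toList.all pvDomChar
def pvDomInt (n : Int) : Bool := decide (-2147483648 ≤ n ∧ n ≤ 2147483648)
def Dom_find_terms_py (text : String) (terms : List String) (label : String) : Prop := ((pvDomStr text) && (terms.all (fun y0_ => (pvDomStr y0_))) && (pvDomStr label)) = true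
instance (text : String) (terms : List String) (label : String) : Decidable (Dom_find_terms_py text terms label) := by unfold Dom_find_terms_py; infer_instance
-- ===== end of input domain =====

-- B transposes the traversal: one pass over text positions trying every term at each
-- position (per-term greedy end markers), then emits matches grouped per term,
-- instead of A's per-term while loop of repeated text.find restarts (objective:
-- alternative, same cost).

-- ===== PORT A =====
-- hand port of Python's `text.find(term, start)` for 0 ≤ start: the least i ≥ start with
-- term occurring at i (none = Python's -1); exact on that domain.
def pvFindFrom (s t : List Char) (i : Nat) : Option Nat :=
  if h : i + t.length ≤ s.length then
    if t.isPrefixOf (s.drop i) then some i else pvFindFrom s t (i + 1)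
  else none
termination_by s.length + 1 - i
decreasing_by omega

-- A's `while True` loop; fuel s.length + 1 suffices for every nonempty term
-- (start strictly increases each round), so the loop is exact on Pre_.
def aLoop (s t : List Char) (label : String) : Nat → Nat → List (Int × Int × String) → List (Int × Int × String)
  | _, 0, spans => spans
  | start, fuel + 1, spans =>
    match pvFindFrom s t start with
    | none => spans
    | some idx => aLoop s t label (idx + t.length) fuel
        (spans ++ [((idx : Int), (idx : Int) + (t.length : Int), label)])

def find_terms_py (text : String) (terms : List String) (label : String) : List (Int × Int × String) :=
  terms.foldl (fun spans term =>
    aLoop text.toList term.toList label 0 (text.toList.length + 1) spans) []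

-- ===== PORT B =====
-- one state per term: (term, next allowed start, matches so far);
-- `text[i:i+len(term)] == term` ported as (s.drop i).take t.length = t (exact for i ≥ 0)
def bStep (s : List Char) (label : String) (i : Nat)
    (st : List Char × Nat × List (Int × Int × String)) : List Char × Nat × List (Int × Int × String) :=
  if st.2.1 ≤ i ∧ (s.drop i).take st.1.length = st.1 then
    (st.1, i + st.1.length, st.2.2 ++ [((i : Int), (i : Int) + (st.1.length : Int), label)])
  else st

def find_terms_py_alt (text : String) (terms : List String) (label : String) : List (Int × Int × String) :=
  let s := text.toList
  let states := terms.map (fun term => (term.toList, 0, ([] : List (Int × Int × String))))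
  let final := (List.range s.length).foldl (fun sts i => sts.map (bStep s label i)) states
  final.foldl (fun out st => out ++ st.2.2) []

-- ===== PRECONDITION & SPEC =====
-- Pre_ excludes term lists containing the empty string: there A's while loop never
-- terminates (text.find('', start) keeps returning start), so A returns on exactly Pre_.
def Pre_find_terms_py (text : String) (terms : List String) (label : String) : Prop := "" ∉ terms
instance (text : String) (terms : List String) (label : String) : Decidable (Pre_find_terms_py text terms label) := by unfold Pre_find_terms_py; infer_instance

def pvWitness_find_terms_py : String × List String × String := ("abc ab cab", ["ab", "c", "zz"], "TERM")

def Spec_find_terms_py (text : String) (terms : List String) (label : String) (out : List (Int × Int × String)) : Prop := out = find_terms_py_alt text terms label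
instance (text : String) (terms : List String) (label : String) (out : List (Int × Int × String)) : Decidable (Spec_find_terms_py text terms label out) := by unfold Spec_find_terms_py; infer_instance

-- ===== CLAIM (what is proved, stated in full; the proofs are below) =====
def Claim_equal_find_terms_py : Prop := ∀ (text : String) (terms : List String) (label : String), Dom_find_terms_py text terms label → Pre_find_terms_py text terms label → Spec_find_terms_py text terms label (find_terms_py text terms label)

-- ===== LEMMAS AND PROOFS =====

-- proof-only pair form of the per-term state (spans, next allowed start)
def pStep (s t : List Char) (label : String) (p : List (Int × Int × String) × Nat) (i : Nat) : List (Int × Int × String) × Nat :=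
  if p.2 ≤ i ∧ (s.drop i).take t.length = t then
    (p.1 ++ [((i : Int), (i : Int) + (t.length : Int), label)], i + t.length)
  else p

theorem take_drop_eq_iff (s t : List Char) (i : Nat) (hL : 1 ≤ t.length) :
    (s.drop i).take t.length = t ↔ i + t.length ≤ s.length ∧ t.isPrefixOf (s.drop i) := by
  rw [List.isPrefixOf_iff_prefix, List.prefix_iff_eq_take]
  constructor
  · intro h
    have hlen : ((s.drop i).take t.length).length = t.length := by rw [h]
    simp only [List.length_take, List.length_drop] at hlen
    exact ⟨by omega, h.symm⟩
  · intro ⟨_, h⟩; exact h.symm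

theorem aLoop_succ (s t : List Char) (label : String) (start fuel : Nat) (spans : List (Int × Int × String)) :
    aLoop s t label start (fuel + 1) spans =
      match pvFindFrom s t start with
      | none => spans
      | some idx => aLoop s t label (idx + t.length) fuel
          (spans ++ [((idx : Int), (idx : Int) + (t.length : Int), label)]) := rfl

theorem pvFindFrom_some (s t : List Char) (e idx : Nat) (h : pvFindFrom s t e = some idx) :
    e ≤ idx ∧ idx + t.length ≤ s.length ∧ t.isPrefixOf (s.drop idx) ∧
      ∀ j, e ≤ j → j < idx → ¬ t.isPrefixOf (s.drop j) := by
  fun_induction pvFindFrom s t e with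
  | case1 i hle hpre =>
    cases h; exact ⟨le_refl _, hle, hpre, fun j h1 h2 => absurd (Nat.lt_of_le_of_lt h1 h2) (lt_irrefl _)⟩
  | case2 i hle hpre ih =>
    obtain ⟨h1, h2, h3, h4⟩ := ih h
    refine ⟨by omega, h2, h3, fun j hj1 hj2 => ?_⟩
    rcases Nat.eq_or_lt_of_le hj1 with rfl | hlt
    · exact fun hp => hpre hp
    · exact h4 j hlt hj2
  | case3 i hle => cases h

theorem pvFindFrom_none (s t : List Char) (e : Nat) (h : pvFindFrom s t e = none) :
    ∀ j, e ≤ j → j + t.length ≤ s.length → ¬ t.isPrefixOf (s.drop j) := by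
  fun_induction pvFindFrom s t e with
  | case1 i hle hpre => cases h
  | case2 i hle hpre ih =>
    intro j hj1 hj2 hp
    rcases Nat.eq_or_lt_of_le hj1 with rfl | hlt
    · exact hpre hp
    · exact ih h j hlt hj2 hp
  | case3 i hle =>
    intro j hj1 hj2 hp
    exact hle (by omega)

theorem foldl_pStep_skip (s t : List Char) (label : String) (l : List Nat) (acc : List (Int × Int × String)) (e : Nat)
    (h : ∀ i ∈ l, ¬ (e ≤ i ∧ (s.drop i).take t.length = t)) :
    l.foldl (pStep s t label) (acc, e) = (acc, e) := by
  induction l with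
  | nil => rfl
  | cons a l ih =>
    simp only [List.foldl_cons]
    rw [show pStep s t label (acc, e) a = (acc, e) from by
      unfold pStep; rw [if_neg (h a (by simp))]]
    exact ih (fun i hi => h i (by simp [hi]))

theorem foldl_pStep_split (s t : List Char) (label : String) (l : List Nat)
    (acc : List (Int × Int × String)) (e idx : Nat)
    (hmem : idx ∈ l) (hsort : l.Pairwise (· < ·)) (he : e ≤ idx)
    (hP : (s.drop idx).take t.length = t)
    (hmin : ∀ i ∈ l, e ≤ i → (s.drop i).take t.length = t → idx ≤ i)
    (hL : 1 ≤ t.length) :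
    l.foldl (pStep s t label) (acc, e) =
      l.foldl (pStep s t label) (acc ++ [((idx : Int), (idx : Int) + (t.length : Int), label)], idx + t.length) := by
  induction l generalizing acc with
  | nil => cases hmem
  | cons a l ih =>
    have hpw := (List.pairwise_cons.mp hsort)
    by_cases hc : e ≤ a ∧ (s.drop a).take t.length = t
    · have hia : idx ≤ a := hmin a (by simp) hc.1 hc.2
      have hai : a = idx := by
        rcases List.mem_cons.mp hmem with rfl | hmem'
        · rfl
        · exact absurd (hpw.1 idx hmem') (by omega)
      subst hai
      simp only [List.foldl_cons]
      rw [show pStep s t label (acc, e) a = (acc ++ [((a : Int), (a : Int) + (t.length : Int), label)], a + t.length) from by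
        unfold pStep; rw [if_pos hc]]
      rw [show pStep s t label (acc ++ [((a : Int), (a : Int) + (t.length : Int), label)], a + t.length) a
            = (acc ++ [((a : Int), (a : Int) + (t.length : Int), label)], a + t.length) from by
        unfold pStep
        rw [if_neg]
        intro ⟨hq, _⟩
        omega]
    · have hane : idx ∈ l := by
        rcases List.mem_cons.mp hmem with rfl | hmem'
        · exact absurd ⟨he, hP⟩ hc
        · exact hmem'
      simp only [List.foldl_cons]
      rw [show pStep s t label (acc, e) a = (acc, e) from by unfold pStep; rw [if_neg hc]]
      rw [show pStep s t label (acc ++ [((idx : Int), (idx : Int) + (t.length : Int), label)], idx + t.length) a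
            = (acc ++ [((idx : Int), (idx : Int) + (t.length : Int), label)], idx + t.length) from by
        unfold pStep
        rw [if_neg]
        intro ⟨h1, h2⟩
        rcases Nat.lt_or_ge a e with hlt | hge
        · omega
        · exact hc ⟨hge, h2⟩]
      exact ih _ hane hpw.2 (fun i hi => hmin i (List.mem_cons_of_mem _ hi))

-- A's find loop computes the pair fold over all text positions
theorem aLoop_eq_foldl (s t : List Char) (label : String) (hL : 1 ≤ t.length) :
    ∀ (fuel e : Nat) (acc : List (Int × Int × String)), s.length + 1 ≤ fuel + e →
      aLoop s t label e fuel acc =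
        ((List.range s.length).foldl (pStep s t label) (acc, e)).1 := by
  intro fuel
  induction fuel with
  | zero =>
    intro e acc hfe
    rw [foldl_pStep_skip]
    · rfl
    · intro i _ ⟨h1, h2⟩
      obtain ⟨h3, _⟩ := (take_drop_eq_iff s t i hL).mp h2
      omega
  | succ fuel ih =>
    intro e acc hfe
    cases hfind : pvFindFrom s t e with
    | none =>
      rw [aLoop_succ, hfind]
      rw [foldl_pStep_skip]
      intro i _ ⟨h1, h2⟩
      obtain ⟨h3, h4⟩ := (take_drop_eq_iff s t i hL).mp h2
      exact pvFindFrom_none s t e hfind i h1 h3 h4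
    | some idx =>
      obtain ⟨h1, h2, h3, h4⟩ := pvFindFrom_some s t e idx hfind
      rw [aLoop_succ, hfind]
      show aLoop s t label (idx + t.length) fuel
          (acc ++ [((idx : Int), (idx : Int) + (t.length : Int), label)]) = _
      rw [ih (idx + t.length) _ (by omega)]
      congr 1
      rw [foldl_pStep_split s t label _ acc e idx]
      · simp only [List.mem_range]; omega
      · exact List.pairwise_lt_range
      · exact h1
      · exact (take_drop_eq_iff s t idx hL).mpr ⟨h2, h3⟩
      · intro i _ hie hPi
        by_contra hni
        exact h4 i hie (by omega) ((take_drop_eq_iff s t i hL).mp hPi).2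
      · exact hL

-- B's outer fold over positions of a map-step commutes into a map of per-state folds
theorem foldl_map_commute {α : Type} (g : Nat → α → α) :
    ∀ (r : List Nat) (init : List α),
      r.foldl (fun sts i => sts.map (g i)) init = init.map (fun x => r.foldl (fun st i => g i st) x) := by
  intro r
  induction r with
  | nil => intro init; simp
  | cons a r ih =>
    intro init
    simp only [List.foldl_cons, ih, List.map_map]
    rfl

-- the triple fold of bStep is the pair fold of pStep carrying the term unchanged
theorem bStep_pStep (s t : List Char) (label : String) :
    ∀ (l : List Nat) (e : Nat) (acc : List (Int × Int × String)),
      l.foldl (fun st i => bStep s label i st) (t, e, acc) =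
        (t, (l.foldl (pStep s t label) (acc, e)).2, (l.foldl (pStep s t label) (acc, e)).1) := by
  intro l
  induction l with
  | nil => intro e acc; rfl
  | cons a l ih =>
    intro e acc
    simp only [List.foldl_cons]
    by_cases hc : e ≤ a ∧ (s.drop a).take t.length = t
    · rw [show bStep s label a (t, e, acc)
            = (t, a + t.length, acc ++ [((a : Int), (a : Int) + (t.length : Int), label)]) from by
        unfold bStep; rw [if_pos hc]]
      rw [show pStep s t label (acc, e) a
            = (acc ++ [((a : Int), (a : Int) + (t.length : Int), label)], a + t.length) from by
        unfold pStep; rw [if_pos hc]]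
      exact ih _ _
    · rw [show bStep s label a (t, e, acc) = (t, e, acc) from by unfold bStep; rw [if_neg hc]]
      rw [show pStep s t label (acc, e) a = (acc, e) from by unfold pStep; rw [if_neg hc]]
      exact ih _ _

-- the pair fold only appends: the accumulator factors out
theorem foldl_pStep_factor (s t : List Char) (label : String) :
    ∀ (l : List Nat) (acc : List (Int × Int × String)) (e : Nat),
      l.foldl (pStep s t label) (acc, e)
        = (acc ++ (l.foldl (pStep s t label) ([], e)).1, (l.foldl (pStep s t label) ([], e)).2) := by
  intro l
  induction l with
  | nil => intro acc e; simp
  | cons a l ih =>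
    intro acc e
    simp only [List.foldl_cons]
    by_cases hc : e ≤ a ∧ (s.drop a).take t.length = t
    · rw [show pStep s t label (acc, e) a
            = (acc ++ [((a : Int), (a : Int) + (t.length : Int), label)], a + t.length) from by
        unfold pStep; rw [if_pos hc]]
      rw [show pStep s t label (([] : List (Int × Int × String)), e) a
            = ([((a : Int), (a : Int) + (t.length : Int), label)], a + t.length) from by
        unfold pStep; rw [if_pos hc]; simp]
      rw [ih (acc ++ [((a : Int), (a : Int) + (t.length : Int), label)]) (a + t.length),
          ih [((a : Int), (a : Int) + (t.length : Int), label)] (a + t.length)]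
      simp
    · rw [show pStep s t label (acc, e) a = (acc, e) from by unfold pStep; rw [if_neg hc]]
      rw [show pStep s t label (([] : List (Int × Int × String)), e) a = ([], e) from by
        unfold pStep; rw [if_neg hc]]
      exact ih acc e

theorem toList_ne_nil (term : String) (h : term ≠ "") : 1 ≤ term.toList.length := by
  have hne : term.toList ≠ [] := by simpa [String.toList_eq_nil_iff] using h
  exact List.length_pos_of_ne_nil hne

-- both sides equal the same fold appending each term's own match list
theorem fold_terms_eq (text : String) (label : String) : ∀ (terms : List String) (init : List (Int × Int × String)),
    (∀ x ∈ terms, x ≠ "") →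
    terms.foldl (fun spans term =>
        aLoop text.toList term.toList label 0 (text.toList.length + 1) spans) init =
    terms.foldl (fun spans term =>
        spans ++ (((List.range text.toList.length).foldl (pStep text.toList term.toList label) ([], 0)).1)) init := by
  intro terms
  induction terms with
  | nil => intro _ _; rfl
  | cons a l ih =>
    intro init hne
    simp only [List.foldl_cons]
    rw [aLoop_eq_foldl text.toList a.toList label (toList_ne_nil a (hne a (by simp))) _ 0 init (by omega),
        foldl_pStep_factor]
    exact ih _ (fun x hx => hne x (by simp [hx]))

-- ===== VERDICT (by name: the statement is the Claim_ definition above) =====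
theorem find_terms_py_spec : Claim_equal_find_terms_py := by
  intro text terms label _ hpre
  show find_terms_py text terms label = find_terms_py_alt text terms label
  unfold find_terms_py find_terms_py_alt
  simp only []
  rw [foldl_map_commute, List.map_map, List.foldl_map]
  simp only [Function.comp, bStep_pStep]
  exact fold_terms_eq text label terms [] (fun x hx hxe => hpre (hxe ▸ hx))
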